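-- pv_equiv track=rewrite | github.com/moon470an-sys/Indonesia-Shipping-Intelligence | dashboard/app.py | _classify_kom_for_palette
-- ===== SOURCE A (Python) =====
-- def _classify_kom_for_palette(label: str | None) -> str:
--     """Bucket a freeform komoditi text into a stable color category for charts."""
--     if not label:
--         return "기타"
--     s = str(label).upper()
--     if "CRUDE" in s or "MENTAH" in s:                 return "Crude"
--     if "CPO" in s or "PALM OIL" in s or "MINYAK SAWIT" in s: return "CPO/팜오일"
--     if "LNG" in s or "NATURAL GAS" in s or "GAS ALAM" in s: return "LNG"
--     if any(k in s for k in ("LPG", "ELPIJI", "PROPANE", "BUTANE")): return "LPG"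
--     if any(k in s for k in ("PERTALITE", "PERTAMAX", "GASOLINE", "BENZIN", "MOGAS")): return "BBM-가솔린"
--     if any(k in s for k in ("SOLAR", "DIESEL", "BIOSOLAR", "GASOIL", "GAS OIL")): return "BBM-디젤"
--     if "AVTUR" in s or "JET" in s or "AVGAS" in s:    return "BBM-항공유"
--     if "BBM" in s:                                    return "BBM-기타"
--     if "CHEMICAL" in s or "KIMIA" in s:               return "Chemical"
--     if any(k in s for k in ("FAME", "BIODIESEL", "METHYL ESTER", "METIL ESTER")): return "FAME"
--     if "ASPHALT" in s or "ASPAL" in s:                return "아스팔트"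
--     if any(k in s for k in ("RBD", "OLEIN", "STEARIN", "PKO", "CPKO", "PKS")): return "팜 파생"
--     if "MINYAK" in s or "VEGETABLE OIL" in s:         return "기타 식용유"
--     if "FUEL OIL" in s or "BUNKER" in s:              return "벙커유"
--     if "NAPHTHA" in s or "NAFTA" in s:                return "Naphtha"
--     if "KEROSEN" in s:                                return "Kerosene"
--     return "기타"
-- ===== SOURCE B (Python) =====
-- # Exhaustive scoring: check every keyword, collect the rule indices of all
-- # matches, and return the category of the minimum (highest-priority) index.
-- _KW = (
--     ("CRUDE", 0), ("MENTAH", 0),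
--     ("CPO", 1), ("PALM OIL", 1), ("MINYAK SAWIT", 1),
--     ("LNG", 2), ("NATURAL GAS", 2), ("GAS ALAM", 2),
--     ("LPG", 3), ("ELPIJI", 3), ("PROPANE", 3), ("BUTANE", 3),
--     ("PERTALITE", 4), ("PERTAMAX", 4), ("GASOLINE", 4), ("BENZIN", 4), ("MOGAS", 4),
--     ("SOLAR", 5), ("DIESEL", 5), ("BIOSOLAR", 5), ("GASOIL", 5), ("GAS OIL", 5),
--     ("AVTUR", 6), ("JET", 6), ("AVGAS", 6),
--     ("BBM", 7),
--     ("CHEMICAL", 8), ("KIMIA", 8),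
--     ("FAME", 9), ("BIODIESEL", 9), ("METHYL ESTER", 9), ("METIL ESTER", 9),
--     ("ASPHALT", 10), ("ASPAL", 10),
--     ("RBD", 11), ("OLEIN", 11), ("STEARIN", 11), ("PKO", 11), ("CPKO", 11), ("PKS", 11),
--     ("MINYAK", 12), ("VEGETABLE OIL", 12),
--     ("FUEL OIL", 13), ("BUNKER", 13),
--     ("NAPHTHA", 14), ("NAFTA", 14),
--     ("KEROSEN", 15),
-- )
--
-- _CATS = ("Crude", "CPO/팜오일", "LNG", "LPG", "BBM-가솔린", "BBM-디젤",
--          "BBM-항공유", "BBM-기타", "Chemical", "FAME", "아스팔트", "팜 파생",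
--          "기타 식용유", "벙커유", "Naphtha", "Kerosene")
--
--
-- def _classify_kom_for_palette(label):
--     if not label:
--         return "기타"
--     s = str(label).upper()
--     hits = [i for kw, i in _KW if kw in s]
--     if not hits:
--         return "기타"
--     return _CATS[min(hits)]
-- ===== Notes on version B (the rewrite author's own statement) =====
-- stated objective: alternative
-- what changed: Replaced the short-circuit 16-branch if-cascade with exhaustive scoring: every keyword is tested, all matching rule indices are collected, and the category is looked up at the minimum index; correct because the cascade returns the category of the smallest-index matching rule.
import Mathlib
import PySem

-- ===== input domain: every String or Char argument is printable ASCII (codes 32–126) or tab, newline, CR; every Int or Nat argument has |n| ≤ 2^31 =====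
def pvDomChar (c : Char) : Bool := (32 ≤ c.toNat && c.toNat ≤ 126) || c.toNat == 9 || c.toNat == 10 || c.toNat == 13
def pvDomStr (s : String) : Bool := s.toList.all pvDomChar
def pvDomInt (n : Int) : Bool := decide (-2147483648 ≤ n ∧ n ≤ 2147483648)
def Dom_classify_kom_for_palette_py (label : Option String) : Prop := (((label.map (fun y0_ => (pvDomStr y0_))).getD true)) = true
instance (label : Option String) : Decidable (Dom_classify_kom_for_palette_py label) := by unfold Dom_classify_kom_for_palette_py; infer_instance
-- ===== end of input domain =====

-- B replaces A's short-circuit 16-branch if-cascade by exhaustive scoring: test every keyword, collect all matching rule indices, return the category at the minimum index (alternative decomposition; same cost).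


-- ===== PORT A =====
-- literal transliteration of the if-cascade; `k in s` = PySem.Str.isIn, `.upper()` = PySem.Str.upper
def classify_kom_for_palette_py (label : Option String) : String :=
  match label with
  | none => "기타"
  | some l =>
    if l = "" then "기타"
    else
      let s := PySem.Str.upper l
      if PySem.Str.isIn "CRUDE" s || PySem.Str.isIn "MENTAH" s then "Crude"
      else if PySem.Str.isIn "CPO" s || PySem.Str.isIn "PALM OIL" s || PySem.Str.isIn "MINYAK SAWIT" s then "CPO/팜오일"
      else if PySem.Str.isIn "LNG" s || PySem.Str.isIn "NATURAL GAS" s || PySem.Str.isIn "GAS ALAM" s then "LNG"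
      else if (["LPG", "ELPIJI", "PROPANE", "BUTANE"].any (fun k => PySem.Str.isIn k s)) then "LPG"
      else if (["PERTALITE", "PERTAMAX", "GASOLINE", "BENZIN", "MOGAS"].any (fun k => PySem.Str.isIn k s)) then "BBM-가솔린"
      else if (["SOLAR", "DIESEL", "BIOSOLAR", "GASOIL", "GAS OIL"].any (fun k => PySem.Str.isIn k s)) then "BBM-디젤"
      else if PySem.Str.isIn "AVTUR" s || PySem.Str.isIn "JET" s || PySem.Str.isIn "AVGAS" s then "BBM-항공유"
      else if PySem.Str.isIn "BBM" s then "BBM-기타"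
      else if PySem.Str.isIn "CHEMICAL" s || PySem.Str.isIn "KIMIA" s then "Chemical"
      else if (["FAME", "BIODIESEL", "METHYL ESTER", "METIL ESTER"].any (fun k => PySem.Str.isIn k s)) then "FAME"
      else if PySem.Str.isIn "ASPHALT" s || PySem.Str.isIn "ASPAL" s then "아스팔트"
      else if (["RBD", "OLEIN", "STEARIN", "PKO", "CPKO", "PKS"].any (fun k => PySem.Str.isIn k s)) then "팜 파생"
      else if PySem.Str.isIn "MINYAK" s || PySem.Str.isIn "VEGETABLE OIL" s then "기타 식용유"
      else if PySem.Str.isIn "FUEL OIL" s || PySem.Str.isIn "BUNKER" s then "벙커유"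
      else if PySem.Str.isIn "NAPHTHA" s || PySem.Str.isIn "NAFTA" s then "Naphtha"
      else if PySem.Str.isIn "KEROSEN" s then "Kerosene"
      else "기타"

-- ===== PORT B =====
-- the flat keyword table of Source B: (keyword, rule index)
def pvKwTable : List (String × Int) :=
  [ ("CRUDE", 0), ("MENTAH", 0),
    ("CPO", 1), ("PALM OIL", 1), ("MINYAK SAWIT", 1),
    ("LNG", 2), ("NATURAL GAS", 2), ("GAS ALAM", 2),
    ("LPG", 3), ("ELPIJI", 3), ("PROPANE", 3), ("BUTANE", 3),
    ("PERTALITE", 4), ("PERTAMAX", 4), ("GASOLINE", 4), ("BENZIN", 4), ("MOGAS", 4),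
    ("SOLAR", 5), ("DIESEL", 5), ("BIOSOLAR", 5), ("GASOIL", 5), ("GAS OIL", 5),
    ("AVTUR", 6), ("JET", 6), ("AVGAS", 6),
    ("BBM", 7),
    ("CHEMICAL", 8), ("KIMIA", 8),
    ("FAME", 9), ("BIODIESEL", 9), ("METHYL ESTER", 9), ("METIL ESTER", 9),
    ("ASPHALT", 10), ("ASPAL", 10),
    ("RBD", 11), ("OLEIN", 11), ("STEARIN", 11), ("PKO", 11), ("CPKO", 11), ("PKS", 11),
    ("MINYAK", 12), ("VEGETABLE OIL", 12),
    ("FUEL OIL", 13), ("BUNKER", 13),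
    ("NAPHTHA", 14), ("NAFTA", 14),
    ("KEROSEN", 15) ]

-- Source B's _CATS tuple
def pvCats : List String :=
  ["Crude", "CPO/팜오일", "LNG", "LPG", "BBM-가솔린", "BBM-디젤",
   "BBM-항공유", "BBM-기타", "Chemical", "FAME", "아스팔트", "팜 파생",
   "기타 식용유", "벙커유", "Naphtha", "Kerosene"]

-- Source B: collect the indices of ALL matching keywords, look up _CATS[min(hits)]
-- (the index is always in range 0..15, so the .getD default of the pyGet? lookup is unreachable)
def classify_kom_for_palette_py_alt (label : Option String) : String :=
  match label with
  | none => "기타"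
  | some l =>
    if l = "" then "기타"
    else
      let s := PySem.Str.upper l
      let hits := (pvKwTable.filter (fun e => PySem.Str.isIn e.1 s)).map Prod.snd
      match PySem.List.min? hits (fun x => x) with
      | none => "기타"
      | some i => (PySem.List.pyGet? pvCats i).getD "기타"

-- ===== PRECONDITION & SPEC =====
def Spec_classify_kom_for_palette_py (label : Option String) (out : String) : Prop := out = classify_kom_for_palette_py_alt label
instance (label : Option String) (out : String) : Decidable (Spec_classify_kom_for_palette_py label out) := by unfold Spec_classify_kom_for_palette_py; infer_instance

-- ===== CLAIM (what is proved, stated in full; the proofs are below) =====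
def Claim_equal_classify_kom_for_palette_py : Prop := ∀ (label : Option String), Dom_classify_kom_for_palette_py label → Spec_classify_kom_for_palette_py label (classify_kom_for_palette_py label)

-- ===== LEMMAS AND PROOFS =====

-- the rules of A's cascade, grouped, in priority order (proof-side view of the tables)
def pvKomRules : List (List String × String) :=
  [ (["CRUDE", "MENTAH"], "Crude"),
    (["CPO", "PALM OIL", "MINYAK SAWIT"], "CPO/팜오일"),
    (["LNG", "NATURAL GAS", "GAS ALAM"], "LNG"),
    (["LPG", "ELPIJI", "PROPANE", "BUTANE"], "LPG"),
    (["PERTALITE", "PERTAMAX", "GASOLINE", "BENZIN", "MOGAS"], "BBM-가솔린"),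
    (["SOLAR", "DIESEL", "BIOSOLAR", "GASOIL", "GAS OIL"], "BBM-디젤"),
    (["AVTUR", "JET", "AVGAS"], "BBM-항공유"),
    (["BBM"], "BBM-기타"),
    (["CHEMICAL", "KIMIA"], "Chemical"),
    (["FAME", "BIODIESEL", "METHYL ESTER", "METIL ESTER"], "FAME"),
    (["ASPHALT", "ASPAL"], "아스팔트"),
    (["RBD", "OLEIN", "STEARIN", "PKO", "CPKO", "PKS"], "팜 파생"),
    (["MINYAK", "VEGETABLE OIL"], "기타 식용유"),
    (["FUEL OIL", "BUNKER"], "벙커유"),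
    (["NAPHTHA", "NAFTA"], "Naphtha"),
    (["KEROSEN"], "Kerosene") ]

-- flatten grouped rules into a keyword table with indices starting at n
def pvFlat : List (List String × String) → Int → List (String × Int)
  | [], _ => []
  | g :: t, n => g.1.map (fun k => (k, n)) ++ pvFlat t (n + 1)

theorem pvKwTable_eq_flat : pvKwTable = pvFlat pvKomRules 0 := by decide

-- index of the first matching group
def pvFindIdx (s : String) : List (List String × String) → Option Nat
  | [] => none
  | g :: t => if g.1.any (fun k => PySem.Str.isIn k s) then some 0
              else (pvFindIdx s t).map (· + 1)

theorem pvFlat_snd_ge (t : List (List String × String)) :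
    ∀ (n : Int) (e : String × Int), e ∈ pvFlat t n → n ≤ e.2 := by
  induction t with
  | nil => intro n e h; simp [pvFlat] at h
  | cons g t ih =>
    intro n e h
    simp only [pvFlat, List.mem_append, List.mem_map] at h
    rcases h with ⟨k, _, rfl⟩ | h
    · exact le_refl n
    · linarith [ih (n + 1) e h]

theorem pv_foldl_min_eq (l : List Int) :
    ∀ (x : Int), (∀ y ∈ l, x ≤ y) → l.foldl min x = x := by
  induction l with
  | nil => intro x _; rfl
  | cons a l ih =>
    intro x h
    have hx : min x a = x := min_eq_left (h a (by simp))
    simp only [List.foldl_cons, hx]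
    exact ih x (fun y hy => h y (by simp [hy]))

-- min? of a cons-list whose head is ≤ every element is the head
theorem pv_min?_head (x : Int) (t : List Int) (h : ∀ y ∈ t, x ≤ y) :
    PySem.List.min? (x :: t) (fun v => v) = some x := by
  rw [PySem.List.min?_id_cons]
  rw [pv_foldl_min_eq t x h]

-- MAIN: min over the flat filtered table = index of the first matching group (shifted by n)
theorem pv_min_flat (s : String) (rs : List (List String × String)) :
    ∀ (n : Int),
      PySem.List.min? (((pvFlat rs n).filter (fun e => PySem.Str.isIn e.1 s)).map Prod.snd) (fun v => v)
      = (pvFindIdx s rs).map (fun j => n + (j : Int)) := by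
  induction rs with
  | nil => intro n; simp [pvFlat, pvFindIdx, PySem.List.min?]
  | cons g t ih =>
    intro n
    simp only [pvFlat, pvFindIdx, List.filter_append, List.map_append]
    by_cases hg : g.1.any (fun k => PySem.Str.isIn k s) = true
    · -- some keyword of the first group matches: min is n
      rw [if_pos hg]
      -- the first block of hits is (g.1.filter q).map (fun _ => (k, n)) → all equal n
      rcases hq : g.1.filter (fun k => PySem.Str.isIn k s) with _ | ⟨k0, ks⟩
      · exfalso
        rcases List.any_eq_true.mp hg with ⟨k, hk, hks⟩
        have : k ∈ g.1.filter (fun k => PySem.Str.isIn k s) := List.mem_filter.mpr ⟨hk, hks⟩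
        rw [hq] at this; simp at this
      · have hfm : (g.1.map (fun k => (k, n))).filter (fun e => PySem.Str.isIn e.1 s)
            = (g.1.filter (fun k => PySem.Str.isIn k s)).map (fun k => (k, n)) := by
          rw [List.filter_map]; rfl
        rw [hfm, hq]
        simp only [List.map_cons, List.map_map, List.cons_append]
        rw [pv_min?_head]
        · simp
        · intro y hy
          simp only [List.mem_append, List.mem_map, Function.comp] at hy
          rcases hy with ⟨k, _, rfl⟩ | ⟨e, he, rfl⟩
          · exact le_refl n
          · have := pvFlat_snd_ge t (n + 1) e (List.mem_filter.mp he).1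
            linarith
    · -- no keyword of the first group matches: the first block is empty
      rw [if_neg hg]
      have hnil : g.1.filter (fun k => PySem.Str.isIn k s) = [] := by
        rw [List.filter_eq_nil_iff]
        intro k hk hks
        exact hg (List.any_eq_true.mpr ⟨k, hk, hks⟩)
      have hfm : (g.1.map (fun k => (k, n))).filter (fun e => PySem.Str.isIn e.1 s)
          = (g.1.filter (fun k => PySem.Str.isIn k s)).map (fun k => (k, n)) := by
        rw [List.filter_map]; rfl
      rw [hfm, hnil]
      simp only [List.map_nil, List.nil_append]
      rw [ih (n + 1)]
      cases pvFindIdx s t with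
      | none => rfl
      | some j => simp; ring

-- lookup of the first matching group's index in the category list = the foldr cascade
theorem pv_lookup_foldr (s : String) (rs : List (List String × String)) :
    (match pvFindIdx s rs with
     | some j => (PySem.List.pyGet? (rs.map Prod.snd) (j : Int)).getD "기타"
     | none => "기타")
    = rs.foldr (fun r acc => if r.1.any (fun k => PySem.Str.isIn k s) then r.2 else acc) "기타" := by
  induction rs with
  | nil => rfl
  | cons g t ih =>
    simp only [pvFindIdx, List.foldr_cons]
    by_cases hg : g.1.any (fun k => PySem.Str.isIn k s) = true
    · rw [if_pos hg, if_pos hg]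
      simp
    · rw [if_neg hg, if_neg hg, ← ih]
      cases pvFindIdx s t with
      | none => rfl
      | some j =>
        simp only [Option.map_some]
        have : ((j + 1 : Nat) : Int) = ((j : Int) + 1) := by push_cast; ring
        rw [this]
        simp

set_option maxHeartbeats 1000000 in
-- ===== VERDICT (by name: the statement is the Claim_ definition above) =====
theorem classify_kom_for_palette_py_spec : Claim_equal_classify_kom_for_palette_py := by
  intro label _
  unfold Spec_classify_kom_for_palette_py classify_kom_for_palette_py classify_kom_for_palette_py_alt
  cases label with
  | none => rfl
  | some l =>
    rcases eq_or_ne l "" with h | h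
    · simp [h]
    · simp only [if_neg h]
      have hcats : pvCats = pvKomRules.map Prod.snd := by decide
      have hB :
          (match PySem.List.min? ((pvKwTable.filter (fun e => PySem.Str.isIn e.1 (PySem.Str.upper l))).map Prod.snd) (fun x => x) with
           | none => "기타"
           | some i => (PySem.List.pyGet? pvCats i).getD "기타")
          = (match pvFindIdx (PySem.Str.upper l) pvKomRules with
             | some j => (PySem.List.pyGet? (pvKomRules.map Prod.snd) (j : Int)).getD "기타"
             | none => "기타") := by
        rw [pvKwTable_eq_flat, pv_min_flat, hcats]
        cases pvFindIdx (PySem.Str.upper l) pvKomRules with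
        | none => rfl
        | some j => simp
      rw [hB, pv_lookup_foldr]
      simp only [pvKomRules, List.foldr_cons, List.foldr_nil, List.any_cons, List.any_nil,
        Bool.or_false, Bool.or_assoc]
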